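-- pv_equiv track=rewrite | github.com/Galaxy1458/Paddle-bot | webservice/utils/addCommentsInFailedCI.py | get_excode
-- ===== SOURCE A (Python) =====
-- def get_excode(line):
--     index = line.find('EXCODE: ')
--     if index != -1:
--         ret = 0
--         for i in range(index + 8, len(line)):
--             if line[i] < '0' or line[i] > '9':
--                 break
--             ret = ret * 10 + int(line[i])
--         return str(ret) if ret != 0 else '-1'
--     if line.find('Failed to connect to') != -1:
--         return '503'
--     # TODO:
--
--     return '-1'
-- ===== SOURCE B (Python) =====
-- def get_excode(line):
--     _, sep, rest = line.partition('EXCODE: ')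
--     if sep:
--         n = next((k for k, c in enumerate(rest) if not c.isdigit()), len(rest))
--         num = rest[:n].lstrip('0')
--         return num if num else '-1'
--     return '503' if 'Failed to connect to' in line else '-1'
-- ===== Notes on version B (the rewrite author's own statement) =====
-- stated objective: simpler
-- what changed: A's find-index scan with a Horner digit accumulator and str() is replaced by pure string operations: str.partition, a digit-prefix slice, and stripping leading zeros -- no integer arithmetic at all.
import Mathlib
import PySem

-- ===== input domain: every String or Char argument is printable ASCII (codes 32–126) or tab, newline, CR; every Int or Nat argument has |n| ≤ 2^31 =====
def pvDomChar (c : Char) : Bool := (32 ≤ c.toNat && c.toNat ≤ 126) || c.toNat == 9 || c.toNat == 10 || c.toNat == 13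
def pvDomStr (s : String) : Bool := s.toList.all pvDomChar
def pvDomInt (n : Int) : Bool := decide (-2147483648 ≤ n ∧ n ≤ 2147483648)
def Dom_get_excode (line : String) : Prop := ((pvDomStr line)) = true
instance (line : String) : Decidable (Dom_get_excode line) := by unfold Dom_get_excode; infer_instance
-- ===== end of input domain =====

-- B replaces A's find + Horner digit-accumulator arithmetic + str() by pure string operations: partition, a digit-prefix slice, and stripping leading zeros (simpler decomposition, same cost).

-- ===== PORT A =====
-- A's for-with-break over range(index+8, len(line)); int(line[i]) is PySem.Int.ofChars? on the 1-char string (only reached on a digit, so the getD default is never used)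
def pvALoop (cs : List Char) (i : Nat) (ret : Int) : Int :=
  if h : i < cs.length then
    if cs[i] < '0' ∨ '9' < cs[i] then ret
    else pvALoop cs (i + 1) (ret * 10 + (PySem.Int.ofChars? [cs[i]]).getD 0)
  else ret
termination_by cs.length - i

def get_excode (line : String) : String :=
  let index := PySem.Str.find line "EXCODE: "
  if index ≠ -1 then
    -- find ≠ -1 gives index ≥ 0, so .toNat is exact for the range start
    let ret := pvALoop line.toList (index.toNat + 8) 0
    if ret ≠ 0 then PySem.Int.toStr ret else "-1"
  else if PySem.Str.find line "Failed to connect to" ≠ -1 then "503"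
  else "-1"

-- ===== PORT B =====
-- str.partition(sep) = (head, sep, rest) at the first occurrence; hand port, exact for nonempty sep
def pvPartition (s pat : List Char) : List Char × List Char × List Char :=
  let j := PySem.Chars.find s pat
  if j = -1 then (s, [], [])
  else (s.take j.toNat, pat, s.drop (j.toNat + pat.length))

def get_excode_alt (line : String) : String :=
  let t := pvPartition line.toList "EXCODE: ".toList
  if t.2.1 ≠ [] then
    let rest := t.2.2
    -- n = next((k for k,c in enumerate(rest) if not c.isdigit()), len(rest))
    let n := rest.findIdx (fun c => !PySem.Chars.isdigit c)
    -- lstrip with a one-character strip set is exactly dropWhile of that character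
    let num := (rest.take n).dropWhile (fun c => c == '0')
    if num ≠ [] then String.ofList num else "-1"
  else if PySem.Str.isIn "Failed to connect to" line then "503" else "-1"

-- ===== PRECONDITION & SPEC =====
def Spec_get_excode (line : String) (out : String) : Prop := out = get_excode_alt line
instance (line : String) (out : String) : Decidable (Spec_get_excode line out) := by unfold Spec_get_excode; infer_instance

-- ===== CLAIM (what is proved, stated in full; the proofs are below) =====
def Claim_equal_get_excode : Prop := ∀ (line : String), Dom_get_excode line → Spec_get_excode line (get_excode line)

-- ===== LEMMAS AND PROOFS =====

-- int(c) for a single digit character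
theorem pv_ofChars_digit (c : Char) (h0 : '0' ≤ c) (h9 : c ≤ '9') :
    (PySem.Int.ofChars? [c]).getD 0 = (c.toNat : Int) - 48 := by
  have h1 : 48 ≤ c.toNat := h0
  have h2 : c.toNat ≤ 57 := h9
  have hc : c = Char.ofNat c.toNat := (Char.ofNat_toNat c).symm
  interval_cases h : c.toNat <;> rw [hc] <;> decide

-- A's loop = Horner fold over the maximal digit prefix of the tail starting at i
theorem pvALoop_eq (cs : List Char) (i : Nat) (ret : Int) :
    pvALoop cs i ret
      = ((cs.drop i).takeWhile PySem.Chars.isdigit).foldl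
          (fun a c => a * 10 + ((c.toNat : Int) - 48)) ret := by
  by_cases h : i < cs.length
  · rw [pvALoop, dif_pos h, List.drop_eq_getElem_cons h]
    by_cases hd : cs[i] < '0' ∨ '9' < cs[i]
    · rw [if_pos hd]
      have hnd : PySem.Chars.isdigit cs[i] = false := by
        simp only [PySem.Chars.isdigit, Bool.and_eq_false_iff, decide_eq_false_iff_not, not_le]
        rcases hd with hl | hr
        · exact Or.inl hl
        · exact Or.inr hr
      rw [List.takeWhile_cons_of_neg (by simp [hnd]), List.foldl_nil]
    · rw [if_neg hd]
      rw [not_or, not_lt, not_lt] at hd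
      have hdig : PySem.Chars.isdigit cs[i] = true := by
        simp only [PySem.Chars.isdigit, Bool.and_eq_true, decide_eq_true_eq]
        exact ⟨hd.1, hd.2⟩
      rw [List.takeWhile_cons_of_pos hdig, List.foldl_cons,
        pv_ofChars_digit _ hd.1 hd.2, pvALoop_eq cs (i+1) _]
  · rw [pvALoop, dif_neg h, List.drop_eq_nil_of_le (Nat.le_of_not_lt h)]
    simp
termination_by cs.length - i

-- digit bounds from isdigit
theorem pv_digit_bounds (c : Char) (h : PySem.Chars.isdigit c = true) :
    48 ≤ c.toNat ∧ c.toNat ≤ 57 := by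
  simp only [PySem.Chars.isdigit, Bool.and_eq_true, decide_eq_true_eq] at h
  exact ⟨h.1, h.2⟩

-- Nat Horner value of a digit list
def pvVal (ds : List Char) : Nat := ds.foldl (fun a c => a * 10 + (c.toNat - 48)) 0

-- the Int Horner fold of A is the cast of the Nat Horner fold
theorem pv_int_fold (ds : List Char) (hd : ∀ c ∈ ds, PySem.Chars.isdigit c = true) : ∀ (a : Nat),
    ds.foldl (fun a c => a * 10 + ((c.toNat : Int) - 48)) (a : Int)
      = ((ds.foldl (fun a c => a * 10 + (c.toNat - 48)) a : Nat) : Int) := by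
  induction ds with
  | nil => intro a; simp
  | cons c ds ih =>
    intro a
    have h48 := (pv_digit_bounds c (hd c List.mem_cons_self)).1
    have hcast : (a : Int) * 10 + ((c.toNat : Int) - 48) = ((a * 10 + (c.toNat - 48) : Nat) : Int) := by
      push_cast [Nat.cast_sub h48]
      ring
    rw [List.foldl_cons, List.foldl_cons, hcast, ih (fun x hx => hd x (List.mem_cons_of_mem c hx))]

-- Horner fold with a general initial accumulator
theorem pv_horner_init (ds : List Char) : ∀ (a : Nat),
    ds.foldl (fun a c => a * 10 + (c.toNat - 48)) a = a * 10 ^ ds.length + pvVal ds := by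
  induction ds with
  | nil => intro a; simp [pvVal]
  | cons c ds ih =>
    intro a
    have h2 : pvVal (c :: ds) = (c.toNat - 48) * 10 ^ ds.length + pvVal ds := by
      rw [pvVal, List.foldl_cons, ih]
      ring_nf
    rw [List.foldl_cons, ih, h2, List.length_cons, pow_succ]
    ring

-- value of a concat
theorem pv_val_concat (ds : List Char) (c : Char) :
    pvVal (ds ++ [c]) = pvVal ds * 10 + (c.toNat - 48) := by
  rw [pvVal, List.foldl_append, List.foldl_cons, List.foldl_nil]
  rfl

-- value is zero iff every digit is the character '0'
theorem pv_val_zero_iff (ds : List Char) (hd : ∀ c ∈ ds, PySem.Chars.isdigit c = true) :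
    pvVal ds = 0 ↔ ∀ c ∈ ds, c = '0' := by
  induction ds with
  | nil => simp [pvVal]
  | cons c ds ih =>
    have hb := pv_digit_bounds c (hd c List.mem_cons_self)
    have hd' : ∀ x ∈ ds, PySem.Chars.isdigit x = true := fun x hx => hd x (List.mem_cons_of_mem c hx)
    have hpv : pvVal (c :: ds) = (c.toNat - 48) * 10 ^ ds.length + pvVal ds := by
      rw [pvVal, List.foldl_cons, pv_horner_init]
      ring_nf
    have h10 : 0 < (10 : Nat) ^ ds.length := by positivity
    have hc48 : c.toNat - 48 = 0 ↔ c = '0' := by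
      constructor
      · intro h
        have : c.toNat = 48 := by omega
        rw [← Char.ofNat_toNat c, this]
      · intro h
        rw [h]
        decide
    constructor
    · intro h
      rw [hpv] at h
      have h1 : c.toNat - 48 = 0 := by
        have hm := Nat.eq_zero_of_add_eq_zero_right h
        rcases Nat.mul_eq_zero.mp hm with h' | h'
        · exact h'
        · exact absurd h' (by omega)
      have h2 : pvVal ds = 0 := Nat.eq_zero_of_add_eq_zero_left h
      intro x hx
      rcases List.mem_cons.mp hx with hx | hx
      · rw [hx]; exact hc48.mp h1
      · exact (ih hd').mp h2 x hx
    · intro h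
      have hz : pvVal ds = 0 := (ih hd').mpr (fun x hx => h x (List.mem_cons_of_mem c hx))
      have h1 : c.toNat - 48 = 0 := hc48.mpr (h c List.mem_cons_self)
      rw [hpv, hz, h1]
      ring

-- digitChar round-trip on a digit character
theorem pv_digitChar (c : Char) (h : PySem.Chars.isdigit c = true) :
    Nat.digitChar (c.toNat - 48) = c := by
  obtain ⟨h1, h2⟩ := pv_digit_bounds c h
  have hc : c = Char.ofNat c.toNat := (Char.ofNat_toNat c).symm
  interval_cases h : c.toNat <;> rw [hc] <;> decide

-- the decimal digits of a positive Horner value are the digit list with leading zeros stripped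
theorem pv_toDigits (ds : List Char) (hd : ∀ c ∈ ds, PySem.Chars.isdigit c = true)
    (h : 0 < pvVal ds) :
    Nat.toDigits 10 (pvVal ds) = ds.dropWhile (fun c => c == '0') := by
  induction ds using List.reverseRecOn with
  | nil => simp [pvVal] at h
  | append_singleton ds c ih =>
    have hc : PySem.Chars.isdigit c = true := hd c (List.mem_append_right ds List.mem_cons_self)
    have hd' : ∀ x ∈ ds, PySem.Chars.isdigit x = true :=
      fun x hx => hd x (List.mem_append_left [c] hx)
    obtain ⟨h48, h57⟩ := pv_digit_bounds c hc
    have hdlt : c.toNat - 48 < 10 := by omega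
    rw [pv_val_concat] at h ⊢
    by_cases hz : pvVal ds = 0
    · have hall : ∀ x ∈ ds, x = '0' := (pv_val_zero_iff ds hd').mp hz
      have hpos : 0 < c.toNat - 48 := by omega
      have hcne : (c == '0') = false := by
        simp only [beq_eq_false_iff_ne, ne_eq]
        intro he
        rw [he] at hpos
        simp at hpos
      rw [hz, Nat.zero_mul, Nat.zero_add, Nat.toDigits_of_lt_base hdlt, pv_digitChar c hc]
      rw [List.dropWhile_append]
      have : ds.dropWhile (fun c => c == '0') = [] := by
        rw [List.dropWhile_eq_nil_iff]
        intro x hx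
        simp [hall x hx]
      rw [this]
      simp [hcne]
    · have hpos : 0 < pvVal ds := Nat.pos_of_ne_zero hz
      have hmul : pvVal ds * 10 + (c.toNat - 48) = 10 * pvVal ds + (c.toNat - 48) := by ring
      rw [hmul, ← Nat.toDigits_append_toDigits (by norm_num) hpos hdlt,
        ih hd' hpos, Nat.toDigits_of_lt_base hdlt, pv_digitChar c hc]
      rw [List.dropWhile_append]
      have hne : (ds.dropWhile (fun c => c == '0')).isEmpty = false := by
        rw [List.isEmpty_eq_false_iff, ne_eq, List.dropWhile_eq_nil_iff]
        intro hall
        apply hz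
        rw [pv_val_zero_iff ds hd']
        intro x hx
        have := hall x hx
        simpa using this
      rw [hne]
      simp

theorem pv_main (line : String) : get_excode line = get_excode_alt line := by
  unfold get_excode get_excode_alt pvPartition
  by_cases hj : PySem.Chars.find line.toList ['E','X','C','O','D','E',':',' '] = -1
  · simp only [PySem.Str.find_eq]
    simp [hj]
    split_ifs <;> simp_all [PySem.Chars.isIn]
  · have hpat : "EXCODE: ".toList = ['E','X','C','O','D','E',':',' '] := rfl
    simp only [PySem.Str.find_eq, hpat]
    rw [if_pos hj, if_neg hj]
    simp only [ne_eq, reduceCtorEq, not_false_eq_true, if_true, List.length_cons,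
      List.length_nil]
    have h8 : (0 + 1 + 1 + 1 + 1 + 1 + 1 + 1 + 1 : Nat) = 8 := rfl
    rw [h8, pvALoop_eq]
    set j := PySem.Chars.find line.toList ['E','X','C','O','D','E',':',' '] with hjdef
    set rest := line.toList.drop (j.toNat + 8) with hrestdef
    set ds := rest.takeWhile PySem.Chars.isdigit with hdsdef
    have hdig : ∀ c ∈ ds, PySem.Chars.isdigit c = true := fun c hc => List.mem_takeWhile_imp hc
    have hfold := pv_int_fold ds hdig 0
    simp only [Nat.cast_zero] at hfold
    rw [hfold]
    have hnum : (rest.take (rest.findIdx (fun c => !PySem.Chars.isdigit c))).dropWhile (fun c => c == '0')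
        = ds.dropWhile (fun c => c == '0') := by
      rw [hdsdef, List.takeWhile_eq_take_findIdx_not]
    rw [hnum]
    have hpv : ds.foldl (fun a c => a * 10 + (c.toNat - 48)) 0 = pvVal ds := rfl
    rw [hpv]
    by_cases hz : pvVal ds = 0
    · have hdw : ds.dropWhile (fun c => c == '0') = [] := by
        rw [List.dropWhile_eq_nil_iff]
        intro x hx
        simp [(pv_val_zero_iff ds hdig).mp hz x hx]
      rw [hz, hdw]
      norm_num
    · have hpos : 0 < pvVal ds := Nat.pos_of_ne_zero hz
      have hne0 : ((pvVal ds : Int) ≠ 0) := by exact_mod_cast hz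
      have hdw : ds.dropWhile (fun c => c == '0') ≠ [] := by
        rw [ne_eq, List.dropWhile_eq_nil_iff]
        intro hall
        apply hz
        rw [pv_val_zero_iff ds hdig]
        intro x hx
        simpa using hall x hx
      rw [if_pos hne0, if_pos hdw]
      rw [PySem.Int.toStr.eq_1, PySem.Int.toChars]
      have hnneg : ¬((pvVal ds : Int) < 0) := not_lt.mpr (Int.natCast_nonneg _)
      rw [if_neg hnneg, Int.toNat_natCast, pv_toDigits ds hdig hpos]

-- ===== VERDICT (by name: the statement is the Claim_ definition above) =====
theorem get_excode_spec : Claim_equal_get_excode := by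
  intro line _
  unfold Spec_get_excode
  exact pv_main line
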